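-- pv_equiv track=rewrite | github.com/e2izaveta/AS_Python_1sem | 2.3lab/main.py | RemoveCols
-- ===== SOURCE A (Python) =====
-- def RemoveCols(A, K1, K2):
--     # Если матрица пустая или K1 > количества столбцов
--     if not A or K1 > len(A[0]):
--         return A
--
--     # Определяем, до какого столбца удалять
--     end_col = min(K2, len(A[0]))
--
--     # Удаляем столбцы с K1 до end_col
--     result = []
--     for row in A:
--         new_row = []
--         for j in range(len(row)):
--             # j+1 - потому что в задании нумерация с 1
--             if j + 1 < K1 or j + 1 > end_col:
--                 new_row.append(row[j])
--         result.append(new_row)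
--
--     return result
-- ===== SOURCE B (Python) =====
-- def RemoveCols(A, K1, K2):
--     if not A or K1 > len(A[0]):
--         return A
--     end_col = min(K2, len(A[0]))
--     start = max(K1 - 1, 0)
--     cut = max(end_col, start)
--     return [row[:start] + row[cut:] for row in A]
-- ===== Notes on version B (the rewrite author's own statement) =====
-- stated objective: simpler
-- what changed: The inner per-element index-testing loop is replaced by computing clamped cut points once and concatenating two row slices (row[:start] + row[cut:]) per row.
import Mathlib
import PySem

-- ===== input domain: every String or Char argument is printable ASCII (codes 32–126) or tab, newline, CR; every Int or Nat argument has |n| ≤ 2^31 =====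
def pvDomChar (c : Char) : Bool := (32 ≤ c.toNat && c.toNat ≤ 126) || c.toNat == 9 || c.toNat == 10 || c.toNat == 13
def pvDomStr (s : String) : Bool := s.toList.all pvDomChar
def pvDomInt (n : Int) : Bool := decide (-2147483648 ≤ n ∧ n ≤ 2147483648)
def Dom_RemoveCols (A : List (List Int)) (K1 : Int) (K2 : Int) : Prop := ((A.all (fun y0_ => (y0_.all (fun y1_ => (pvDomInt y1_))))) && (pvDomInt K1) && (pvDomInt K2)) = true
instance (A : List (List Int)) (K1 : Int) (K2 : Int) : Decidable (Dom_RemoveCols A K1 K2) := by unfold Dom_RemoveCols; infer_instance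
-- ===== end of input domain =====

-- B replaces the inner element-by-element index test with two clamped slices per row (simpler).

-- ===== PORT A =====
def RemoveCols (A : List (List Int)) (K1 : Int) (K2 : Int) : List (List Int) :=
  if A = [] ∨ K1 > ((A.headD []).length : Int) then A
  else
    let endCol : Int := min K2 ((A.headD []).length : Int)
    A.foldl (fun result row =>
      result ++ [(List.range row.length).foldl (fun (newRow : List Int) (j : ℕ) =>
        if (j : Int) + 1 < K1 ∨ (j : Int) + 1 > endCol then newRow ++ [row.getD j 0]
        else newRow) []]) []

-- ===== PORT B =====
def RemoveCols_alt (A : List (List Int)) (K1 : Int) (K2 : Int) : List (List Int) :=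
  if A = [] ∨ K1 > ((A.headD []).length : Int) then A
  else
    let endCol : Int := min K2 ((A.headD []).length : Int)
    let start : Int := max (K1 - 1) 0
    let cut : Int := max endCol start
    A.map (fun row => PySem.List.slice row none (some start) ++ PySem.List.slice row (some cut) none)

-- ===== PRECONDITION & SPEC =====
def Spec_RemoveCols (A : List (List Int)) (K1 : Int) (K2 : Int) (out : List (List Int)) : Prop := out = RemoveCols_alt A K1 K2
instance (A : List (List Int)) (K1 : Int) (K2 : Int) (out : List (List Int)) : Decidable (Spec_RemoveCols A K1 K2 out) := by unfold Spec_RemoveCols; infer_instance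

-- ===== CLAIM (what is proved, stated in full; the proofs are below) =====
def Claim_equal_RemoveCols : Prop := ∀ (A : List (List Int)) (K1 : Int) (K2 : Int), Dom_RemoveCols A K1 K2 → Spec_RemoveCols A K1 K2 (RemoveCols A K1 K2)

-- ===== LEMMAS AND PROOFS =====

-- turn the Prop-conditioned append loop into filter+map
theorem foldl_ite_append {α β : Type} (P : α → Prop) [DecidablePred P] (f : α → β)
    (l : List α) (acc : List β) :
    l.foldl (fun nr x => if P x then nr ++ [f x] else nr) acc
      = acc ++ (l.filter (fun x => decide (P x))).map f := by
  induction l generalizing acc with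
  | nil => simp
  | cons x xs ih =>
    simp only [List.foldl_cons, List.filter_cons]
    by_cases h : P x <;> simp [h, ih]

-- an initial and a final index segment: the filter splits as a concatenation
theorem filter_range_split (n a b : ℕ) (hab : a ≤ b) :
    (List.range n).filter (fun j => decide (j < a ∨ b ≤ j))
      = (List.range n).filter (fun j => decide (j < a))
        ++ (List.range n).filter (fun j => decide (b ≤ j)) := by
  induction n with
  | zero => simp
  | succ n ih =>
    simp only [List.range_succ, List.filter_append, ih, List.filter_singleton]
    by_cases h1 : n < a
    · have hb : ¬ b ≤ n := by omega
      have : (List.range n).filter (fun j => decide (b ≤ j)) = [] := by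
        apply List.filter_eq_nil_iff.2
        intro j hj
        have := List.mem_range.1 hj
        simp only [decide_eq_true_eq]
        omega
      simp [h1, hb, this]
    · by_cases h2 : b ≤ n <;> simp [h1, h2]

-- the initial segment of kept indices gives the take-prefix
theorem map_filter_lt (row : List Int) (a : ℕ) :
    ∀ n, n ≤ row.length →
    ((List.range n).filter (fun j => decide (j < a))).map (fun j => row.getD j 0)
      = (row.take n).take a := by
  intro n
  induction n with
  | zero => simp
  | succ n ih =>
    intro hn
    have hn' : n ≤ row.length := by omega
    have hlt : n < row.length := by omega
    have htake : row.take (n + 1) = row.take n ++ [row[n]] :=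
      List.take_succ_eq_append_getElem hlt
    have hlen : (row.take n).length = n := List.length_take_of_le hn'
    simp only [List.range_succ, List.filter_append, List.map_append, ih hn',
      List.filter_singleton, htake]
    by_cases h : n < a
    · have h1 : (row.take n).take a = row.take n := by
        rw [List.take_take]; congr 1; omega
      have h2 : (row.take n ++ [row[n]]).take a = row.take n ++ [row[n]] :=
        List.take_of_length_le (by rw [List.length_append, hlen]; simp; omega)
      rw [h1, h2]
      simp [h, List.getD_eq_getElem?_getD, List.getElem?_eq_getElem hlt]
    · rw [List.take_append_of_le_length (by omega)]
      simp [h]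

-- the final segment of kept indices gives the drop-suffix
theorem map_filter_ge (row : List Int) (b : ℕ) :
    ∀ n, n ≤ row.length →
    ((List.range n).filter (fun j => decide (b ≤ j))).map (fun j => row.getD j 0)
      = (row.take n).drop b := by
  intro n
  induction n with
  | zero => simp
  | succ n ih =>
    intro hn
    have hn' : n ≤ row.length := by omega
    have hlt : n < row.length := by omega
    have htake : row.take (n + 1) = row.take n ++ [row[n]] :=
      List.take_succ_eq_append_getElem hlt
    have hlen : (row.take n).length = n := List.length_take_of_le hn'
    simp only [List.range_succ, List.filter_append, List.map_append, ih hn',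
      List.filter_singleton, htake]
    by_cases h : b ≤ n
    · rw [List.drop_append, hlen, Nat.sub_eq_zero_of_le h]
      simp [h, List.getD_eq_getElem?_getD, List.getElem?_eq_getElem hlt]
    · have h1 : (row.take n).drop b = [] :=
        List.drop_eq_nil_of_le (by rw [List.length_take]; omega)
      have h2 : (row.take n ++ [row[n]]).drop b = [] :=
        List.drop_eq_nil_of_le (by rw [List.length_append, hlen]; simp; omega)
      simp [h, h1]
      omega

-- per-row core: the index-filter loop equals take start ++ drop cut
theorem row_core (row : List Int) (K1 endCol : Int) :
    (List.range row.length).foldl (fun (newRow : List Int) (j : ℕ) =>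
        if (j : Int) + 1 < K1 ∨ (j : Int) + 1 > endCol then newRow ++ [row.getD j 0]
        else newRow) []
      = PySem.List.slice row none (some (max (K1 - 1) 0))
        ++ PySem.List.slice row (some (max endCol (max (K1 - 1) 0))) none := by
  set a : Int := max (K1 - 1) 0 with ha
  set b : Int := max endCol a with hb
  have ha0 : 0 ≤ a := by omega
  have hb0 : 0 ≤ b := by omega
  rw [PySem.List.slice_to row ha0, PySem.List.slice_from row hb0]
  rw [foldl_ite_append]
  have hcond : (List.range row.length).filter
      (fun (j : ℕ) => decide (((j : ℕ) : Int) + 1 < K1 ∨ ((j : ℕ) : Int) + 1 > endCol))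
      = (List.range row.length).filter (fun (j : ℕ) => decide (j < a.toNat ∨ b.toNat ≤ j)) := by
    apply List.filter_congr
    intro j _
    simp only [decide_eq_decide]
    omega
  rw [List.nil_append, hcond, filter_range_split _ _ _ (by omega), List.map_append,
    map_filter_lt row a.toNat row.length le_rfl, map_filter_ge row b.toNat row.length le_rfl,
    List.take_length]

-- ===== VERDICT (by name: the statement is the Claim_ definition above) =====
theorem RemoveCols_spec : Claim_equal_RemoveCols := by
  intro A K1 K2 _
  unfold Spec_RemoveCols RemoveCols RemoveCols_alt
  by_cases hguard : A = [] ∨ K1 > ((A.headD []).length : Int)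
  · rw [if_pos hguard, if_pos hguard]
  · simp only [if_neg hguard, PySem.List.foldl_append_singleton_eq_map, List.nil_append]
    apply List.map_congr_left
    intro row _
    exact row_core row K1 (min K2 ((A.headD []).length : Int))
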